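-- pv_equiv track=rewrite | github.com/augini/advent-of-code | day_7/index.py | align_carbs
-- ===== SOURCE A (Python) =====
-- def align_carbs(input):
--   sum =0
--   for i in range(len(input)):
--     input[i] = int(input[i])
--
--   for x in input:
--     sum+=x
--
--
--
--   sum_collection = {}
--   for x in range(len(input)):
--     for i in range(len(input)):
--       one = abs(input[x])
--       two = abs(input[i])
--
--       if x!=i and sum_collection.get(f"{x}-{one}") is not None:
--         sum_collection[f"{x}-{one}"]+=abs(one-two)
--       elif x==i:
--         continue
--       else:
--         sum_collection[f"{x}-{one}"]=abs(one-two)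
--
--
--   return min(sum_collection.values())
-- ===== SOURCE B (Python) =====
-- def align_carbs(input):
--   # Return-value equivalent to A (A also mutates input[i]=int(input[i]); harmless on int lists).
--   for i in range(len(input)):
--     input[i] = int(input[i])
--   m = sorted(abs(v) for v in input)
--   n = len(m)
--   total = sum(m)
--   left = 0
--   costs = []
--   for k in range(n):
--     v = m[k]
--     costs.append(v * (2 * k - n) + total - 2 * left)
--     left += v
--   return min(costs)
-- ===== Notes on version B (the rewrite author's own statement) =====
-- stated objective: faster
-- what changed: Replaces A's O(n^2) all-pairs accumulation into a string-keyed dict by sorting the absolute values once and evaluating each candidate's total distance in O(1) with a running prefix sum.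
import Mathlib
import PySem

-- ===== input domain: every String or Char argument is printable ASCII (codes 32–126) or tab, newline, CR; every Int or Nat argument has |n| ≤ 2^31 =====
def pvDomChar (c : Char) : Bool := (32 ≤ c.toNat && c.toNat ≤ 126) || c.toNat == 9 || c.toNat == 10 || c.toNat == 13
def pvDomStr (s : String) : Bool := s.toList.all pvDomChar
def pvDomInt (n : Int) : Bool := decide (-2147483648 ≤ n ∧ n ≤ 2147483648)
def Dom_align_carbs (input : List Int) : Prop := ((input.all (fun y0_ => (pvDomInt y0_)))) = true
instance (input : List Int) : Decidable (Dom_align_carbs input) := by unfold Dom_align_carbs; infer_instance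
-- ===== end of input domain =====

-- B replaces A's O(n^2) all-pairs dict accumulation by sort + running prefix sum (measured asymptotically faster).
-- A also mutates its argument in place (input[i] = int(input[i]), the identity on int lists); the equivalence here is about the return value.


-- ===== PORT A =====
def align_carbs (input : List Int) : Int :=
  -- for i in range(len(input)): input[i] = int(input[i])  — int() is the identity on ints
  let input := input.map (fun v => v)
  -- sum = 0; for x in input: sum += x   (computed and never used by A)
  let _sum := input.foldl (fun s x => s + x) 0
  let d := (PySem.List.pyRange 0 input.length 1).foldl (fun d x =>
    (PySem.List.pyRange 0 input.length 1).foldl (fun d i =>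
      let one := |PySem.List.pyGetD input x 0|
      let two := |PySem.List.pyGetD input i 0|
      let key := PySem.Int.toStr x ++ "-" ++ PySem.Int.toStr one
      if x ≠ i ∧ (d.get? key).isSome then
        d.insert key (d.getD key 0 + |one - two|)
      else if x = i then d
      else d.insert key |one - two|) d)
    (PySem.Dict.empty : PySem.Dict String Int)
  -- min(sum_collection.values()) — raises on an empty dict, excluded by Pre_
  (PySem.List.min? d.values (fun v => v)).getD 0

-- ===== PORT B =====
def align_carbs_alt (input : List Int) : Int :=
  let input := input.map (fun v => v)
  let m := PySem.List.sorted (input.map (fun v => |v|)) (fun v => v) false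
  let n : Int := m.length
  let total := m.sum
  let st := (PySem.List.pyRange 0 n 1).foldl (fun (st : Int × List Int) k =>
    let v := PySem.List.pyGetD m k 0
    (st.1 + v, st.2 ++ [v * (2 * k - n) + total - 2 * st.1])) ((0 : Int), ([] : List Int))
  -- min(costs) — raises on the empty list, excluded by Pre_
  (PySem.List.min? st.2 (fun v => v)).getD 0

-- ===== PRECONDITION & SPEC =====
-- A raises ValueError (min() of an empty collection) when len(input) < 2: the dict gets no entry.
def Pre_align_carbs (input : List Int) : Prop := 2 ≤ input.length
instance (input : List Int) : Decidable (Pre_align_carbs input) := by unfold Pre_align_carbs; infer_instance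
def pvWitness_align_carbs : List Int := [16, 1, 2, 0, 4, 2, 7, 1, 2, 14]

def Spec_align_carbs (input : List Int) (out : Int) : Prop := out = align_carbs_alt input
instance (input : List Int) (out : Int) : Decidable (Spec_align_carbs input out) := by unfold Spec_align_carbs; infer_instance

-- ===== CLAIM (what is proved, stated in full; the proofs are below) =====
def Claim_equal_align_carbs : Prop := ∀ (input : List Int), Dom_align_carbs input → Pre_align_carbs input → Spec_align_carbs input (align_carbs input)

-- ===== LEMMAS AND PROOFS =====

-- total absolute distance from v to the (absolute) values of T
def pvCost (T : List Int) (v : Int) : Int := (T.map (fun w => |v - w|)).sum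

-- ---- generic small sum lemmas ----
lemma pv_sum_map_sub_left (l : List Int) (a : Int) :
    (l.map (fun w => a - w)).sum = l.length * a - l.sum := by
  induction l with
  | nil => simp
  | cons x t ih => simp [ih]; ring

lemma pv_sum_map_sub_right (l : List Int) (a : Int) :
    (l.map (fun w => w - a)).sum = l.sum - l.length * a := by
  induction l with
  | nil => simp
  | cons x t ih => simp [ih]; ring

lemma pv_sum_filter_ne (l : List Int) (g : Int → Int) (x : Int) (h0 : g x = 0) :
    (((l.filter (fun i => i ≠ x)).map g)).sum = (l.map g).sum := by
  induction l with
  | nil => rfl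
  | cons i t ih =>
    by_cases hi : i = x
    · subst hi; simpa [List.filter_cons, h0] using ih
    · simp only [List.filter_cons, hi, ne_eq, decide_not] at ih ⊢
      simp only [not_false_iff, decide_false, Bool.not_false, if_pos, List.map_cons,
        List.sum_cons, decide_eq_true_eq, hi]
      rw [ih]

-- ---- digit-string key injectivity ----
lemma pv_digitChar_inj : ∀ a < 10, ∀ b < 10, Nat.digitChar a = Nat.digitChar b → a = b := by decide

lemma pv_toDigits_inj (n m : Nat) (h : Nat.toDigits 10 n = Nat.toDigits 10 m) : n = m := by
  induction n using Nat.strong_induction_on generalizing m with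
  | _ n ih =>
  rw [Nat.toDigits_eq_if (b := 10) (n := n) (by norm_num),
    Nat.toDigits_eq_if (b := 10) (n := m) (by norm_num)] at h
  by_cases hn : n < 10 <;> by_cases hm : m < 10 <;>
    simp only [hn, hm, if_pos, if_neg, not_false_iff] at h
  · exact pv_digitChar_inj n hn m hm (by simpa using h)
  · have hl := congrArg List.length h
    simp at hl
    have hp := Nat.length_toDigits_pos (b := 10) (n := m / 10)
    simp [hl] at hp
  · have hl := congrArg List.length h
    simp at hl
    have hp := Nat.length_toDigits_pos (b := 10) (n := n / 10)
    simp [hl] at hp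
  · obtain ⟨h3, h4⟩ := List.append_inj h (by
      have hp1 := Nat.length_toDigits_pos (b := 10) (n := n / 10)
      have hp2 := Nat.length_toDigits_pos (b := 10) (n := m / 10)
      have hl := congrArg List.length h
      simp at hl; omega)
    have hdiv := ih (n / 10) (by omega) (m / 10) h3
    have hmod := pv_digitChar_inj (n % 10) (Nat.mod_lt _ (by norm_num)) (m % 10)
      (Nat.mod_lt _ (by norm_num)) (by simpa using h4)
    omega

lemma pv_no_dash_toDigits (n : Nat) : '-' ∉ Nat.toDigits 10 n := by
  intro hmem
  have := Nat.isDigit_of_mem_toDigits (b := 10) (n := n) (c := '-') (by norm_num) (le_refl _) hmem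
  simp [Char.isDigit] at this

lemma pv_dash_split (s1 t1 s2 t2 : List Char) (h : s1 ++ '-' :: t1 = s2 ++ '-' :: t2)
    (h1 : '-' ∉ s1) (h2 : '-' ∉ s2) : s1 = s2 := by
  induction s1 generalizing s2 with
  | nil =>
    cases s2 with
    | nil => rfl
    | cons c cs =>
      simp at h
      exact absurd (h.1 ▸ List.mem_cons_self) h2
  | cons c cs ih =>
    cases s2 with
    | nil =>
      simp at h
      exact absurd (h.1 ▸ List.mem_cons_self) h1
    | cons c' cs' =>
      simp at h
      have := ih (s2 := cs') (by simpa using h.2) (fun hm => h1 (List.mem_cons_of_mem _ hm))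
        (fun hm => h2 (List.mem_cons_of_mem _ hm))
      simp [h.1, this]

lemma pv_key_inj (x y a b : Int) (hx : 0 ≤ x) (hy : 0 ≤ y)
    (h : PySem.Int.toStr x ++ "-" ++ PySem.Int.toStr a = PySem.Int.toStr y ++ "-" ++ PySem.Int.toStr b) :
    x = y := by
  have hl := congrArg String.toList h
  simp only [String.toList_append, PySem.Int.toList_toStr] at hl
  have hdash : ("-" : String).toList = ['-'] := rfl
  rw [hdash] at hl
  have hx' : PySem.Int.toChars x = Nat.toDigits 10 x.toNat := by
    simp [PySem.Int.toChars, not_lt.mpr hx]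
  have hy' : PySem.Int.toChars y = Nat.toDigits 10 y.toNat := by
    simp [PySem.Int.toChars, not_lt.mpr hy]
  rw [hx', hy'] at hl
  have hsplit := pv_dash_split (Nat.toDigits 10 x.toNat) (PySem.Int.toChars a)
    (Nat.toDigits 10 y.toNat) (PySem.Int.toChars b) (by simpa using hl)
    (pv_no_dash_toDigits _) (pv_no_dash_toDigits _)
  have := pv_toDigits_inj _ _ hsplit
  omega

-- ---- Dict lemmas specific to this loop ----
lemma pv_insert_insert (d : PySem.Dict String Int) (k : String) (a b : Int) :
    (d.insert k a).insert k b = d.insert k b := by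
  apply PySem.Dict.ext
  by_cases hc : d.contains k
  · rw [PySem.Dict.items_insert_of_contains _ _ hc,
      PySem.Dict.items_insert_of_contains _ _ (by simp [PySem.Dict.contains_insert]),
      PySem.Dict.items_insert_of_contains _ _ hc, List.map_map]
    apply List.map_congr_left
    intro p _
    by_cases hp : p.1 = k <;> simp [hp]
  · have hc' : d.contains k = false := by simpa using hc
    rw [PySem.Dict.items_insert_of_not_contains _ _ hc',
      PySem.Dict.items_insert_of_contains _ _ (by simp [PySem.Dict.contains_insert]),
      PySem.Dict.items_insert_of_not_contains _ _ hc', List.map_append]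
    congr 1
    · conv_rhs => rw [← List.map_id d.items]
      apply List.map_congr_left
      intro p hp
      have hpk : p.1 ≠ k := by
        intro hk
        have : k ∈ d.keys := hk ▸ PySem.Dict.mem_keys_of_mem_items d hp
        rw [← PySem.Dict.contains_iff_mem_keys] at this
        simp [hc'] at this
      simp [hpk]
    · simp

-- collapse A's three branches
lemma pv_step_eq (d : PySem.Dict String Int) (k : String) (x i g1 : Int) :
    (if x ≠ i ∧ (d.get? k).isSome then d.insert k (d.getD k 0 + g1)
     else if x = i then d
     else d.insert k g1)
    = if x = i then d else d.insert k (d.getD k 0 + g1) := by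
  by_cases hx : x = i
  · simp [hx]
  · cases hs : (d.get? k) with
    | none => simp [hx, hs, PySem.Dict.getD_of_get?_eq_none _ _ hs]
    | some v => simp [hx, hs]

-- A's inner loop: accumulate into the single key k
lemma pv_inner_fold (l : List Int) (x : Int) (k : String) (g : Int → Int)
    (d : PySem.Dict String Int) :
    l.foldl (fun d i => if x = i then d else d.insert k (d.getD k 0 + g i)) d
    = if ∀ i ∈ l, i = x then d
      else d.insert k (d.getD k 0 + ((l.filter (fun i => i ≠ x)).map g).sum) := by
  induction l generalizing d with
  | nil => simp
  | cons i t ih =>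
    by_cases hi : i = x
    · subst hi
      simp only [List.foldl_cons, if_pos rfl, ih]
      by_cases ht : ∀ j ∈ t, j = i <;> simp_all [List.filter_cons]
    · have hxi : ¬ x = i := fun h => hi h.symm
      simp only [List.foldl_cons, if_neg hxi, ih]
      by_cases ht : ∀ j ∈ t, j = x
      · have hf : t.filter (fun j => !decide (j = x)) = [] := by
          apply List.filter_eq_nil_iff.mpr; intro a ha; simpa using ht a ha
        rw [if_pos ht]
        simp [List.filter_cons, hi, hf]
      · rw [if_neg ht, pv_insert_insert, PySem.Dict.getD_insert_self]
        simp [List.filter_cons, hi, add_assoc]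

-- A's outer loop over fresh distinct keys appends one value per x
lemma pv_outer_fold (xs : List Int) (l : List Int) (key : Int → String) (g : Int → Int → Int)
    (d : PySem.Dict String Int)
    (hfresh : ∀ x ∈ xs, d.contains (key x) = false)
    (hnodup : (xs.map key).Nodup)
    (hne : ∀ x ∈ xs, ¬ (∀ i ∈ l, i = x)) :
    (xs.foldl (fun d x =>
      l.foldl (fun d i => if x = i then d else d.insert (key x) (d.getD (key x) 0 + g x i)) d) d).values
    = d.values ++ xs.map (fun x => ((l.filter (fun i => i ≠ x)).map (g x)).sum) := by
  induction xs generalizing d with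
  | nil => simp
  | cons x xs ih =>
    simp only [List.foldl_cons, List.map_cons]
    rw [pv_inner_fold, if_neg (hne x List.mem_cons_self),
      PySem.Dict.getD_of_not_contains _ _ (hfresh x List.mem_cons_self), zero_add]
    have hnodup' := hnodup
    rw [List.map_cons, List.nodup_cons] at hnodup'
    have hkx : key x ∉ xs.map key := hnodup'.1
    rw [ih _ (fun y hy => by
        rw [PySem.Dict.contains_insert]
        have : key y ≠ key x := fun he => hkx (he ▸ List.mem_map_of_mem hy)
        simp [this, hfresh y (List.mem_cons_of_mem _ hy)])
      hnodup'.2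
      (fun y hy => hne y (List.mem_cons_of_mem _ hy))]
    simp only [PySem.Dict.values, PySem.Dict.items_insert_of_not_contains _ _ (hfresh x List.mem_cons_self)]
    simp

-- ---- characterization of A ----
lemma pv_A_char (input : List Int) (h2 : 2 ≤ input.length) :
    align_carbs input
    = (PySem.List.min? ((input.map (fun v => |v|)).map (pvCost (input.map (fun v => |v|)))) (fun v => v)).getD 0 := by
  unfold align_carbs
  simp only [List.map_id']
  simp only [pv_step_eq]
  rw [pv_outer_fold (key := fun x => PySem.Int.toStr x ++ "-" ++ PySem.Int.toStr |PySem.List.pyGetD input x 0|)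
      (g := fun x i => abs (|PySem.List.pyGetD input x 0| - |PySem.List.pyGetD input i 0|))]
  · rw [show (PySem.Dict.empty : PySem.Dict String Int).values = [] from rfl, List.nil_append]
    have hinner : ∀ x : Int,
        (((PySem.List.pyRange 0 input.length 1).filter (fun i => i ≠ x)).map
          (fun i => abs (|PySem.List.pyGetD input x 0| - |PySem.List.pyGetD input i 0|))).sum
        = pvCost (input.map (fun v => |v|)) |PySem.List.pyGetD input x 0| := by
      intro x
      rw [pv_sum_filter_ne _ _ x (by simp)]
      have : (PySem.List.pyRange 0 input.length 1).map
          (fun i => abs (|PySem.List.pyGetD input x 0| - |PySem.List.pyGetD input i 0|))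
        = ((PySem.List.pyRange 0 input.length 1).map (fun i => PySem.List.pyGetD input i 0)).map
          (fun w => abs (|PySem.List.pyGetD input x 0| - |w|)) := by
        rw [List.map_map]; rfl
      rw [this, PySem.List.map_pyGetD_pyRange_zero', pvCost, List.map_map]
      rfl
    rw [List.map_congr_left (fun x _ => hinner x)]
    have : (PySem.List.pyRange 0 input.length 1).map
        (fun x => pvCost (input.map (fun v => |v|)) |PySem.List.pyGetD input x 0|)
      = ((PySem.List.pyRange 0 input.length 1).map (fun x => PySem.List.pyGetD input x 0)).map
        (fun v => pvCost (input.map (fun w => |w|)) |v|) := by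
      rw [List.map_map]; rfl
    rw [this, PySem.List.map_pyGetD_pyRange_zero', List.map_map]
    rfl
  · intro x _
    exact PySem.Dict.contains_empty _
  · apply List.Nodup.map_on
    · intro x hx y hy hk
      rw [PySem.List.mem_pyRange_one] at hx hy
      exact pv_key_inj _ _ _ _ hx.1 hy.1 hk
    · exact PySem.List.nodup_pyRange_one _ _
  · intro x hx hall
    have h0 : (0 : Int) ∈ PySem.List.pyRange 0 input.length 1 := by
      rw [PySem.List.mem_pyRange_one]; omega
    have h1 : (1 : Int) ∈ PySem.List.pyRange 0 input.length 1 := by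
      rw [PySem.List.mem_pyRange_one]
      constructor
      · norm_num
      · exact_mod_cast h2
    have := hall 0 h0
    have := hall 1 h1
    omega

-- ---- characterization of B ----
lemma pv_B_fold (m : List Int) (total : Int) (j : Nat) (hj : j ≤ m.length) :
    (PySem.List.pyRange 0 (j : Int) 1).foldl (fun (st : Int × List Int) k =>
      let v := PySem.List.pyGetD m k 0
      (st.1 + v, st.2 ++ [v * (2 * k - (m.length : Int)) + total - 2 * st.1])) ((0 : Int), ([] : List Int))
    = ((m.take j).sum,
       (PySem.List.pyRange 0 (j : Int) 1).map (fun k =>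
         PySem.List.pyGetD m k 0 * (2 * k - (m.length : Int)) + total - 2 * (m.take k.toNat).sum)) := by
  induction j with
  | zero => simp [PySem.List.pyRange_one_eq_nil]
  | succ j ih =>
    have hcast : ((j + 1 : Nat) : Int) = (j : Int) + 1 := by push_cast; ring
    rw [hcast, PySem.List.pyRange_one_succ_right (by positivity), List.foldl_append,
      List.map_append, ih (by omega)]
    simp only [List.foldl_cons, List.foldl_nil, List.map_cons, List.map_nil]
    rw [List.sum_take_succ _ j (by omega)]
    have hget : PySem.List.pyGetD m (j : Int) 0 = m[j] := by
      rw [PySem.List.pyGetD_natCast]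
      exact List.getD_eq_getElem _ _ (by omega)
    simp [hget]
    rfl

lemma pv_sorted_cost (m : List Int) (hs : m.Sorted (· ≤ ·)) (i : Nat) (hi : i < m.length) :
    pvCost m (m[i]) = m[i] * (2 * (i : Int) - (m.length : Int)) + m.sum - 2 * (m.take i).sum := by
  have hsplit : m = m.take i ++ m.drop i := (List.take_append_drop i m).symm
  have hlen_take : (m.take i).length = i := by simp [List.length_take]; omega
  have hdrop : m.drop i = m[i] :: m.drop (i + 1) := (List.getElem_cons_drop hi).symm
  have h1 : ∀ w ∈ m.take i, w ≤ m[i] := fun w hw =>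
    hs.rel_of_mem_take_of_mem_drop hw (hdrop ▸ List.mem_cons_self)
  have h2 : ∀ w ∈ m.drop i, m[i] ≤ w := by
    intro w hw
    rw [hdrop] at hw
    rcases List.mem_cons.mp hw with h | h
    · exact le_of_eq (h ▸ rfl)
    · exact List.rel_of_pairwise_cons (hdrop ▸ hs.drop (i := i)) h
  have e1 : (m.take i).map (fun w => |m[i] - w|) = (m.take i).map (fun w => m[i] - w) :=
    List.map_congr_left (fun w hw => abs_of_nonneg (by have := h1 w hw; omega))
  have e2 : (m.drop i).map (fun w => |m[i] - w|) = (m.drop i).map (fun w => w - m[i]) :=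
    List.map_congr_left (fun w hw => by rw [abs_sub_comm]; exact abs_of_nonneg (by have := h2 w hw; omega))
  obtain ⟨v, hv⟩ : ∃ v, m[i] = v := ⟨m[i], rfl⟩
  rw [hv] at h1 h2 e1 e2 ⊢
  calc pvCost m v
      = ((m.take i).map (fun w => |v - w|)).sum + ((m.drop i).map (fun w => |v - w|)).sum := by
        rw [pvCost]
        conv_lhs => rw [hsplit]
        rw [List.map_append, List.sum_append]
    _ = ((m.take i).length * v - (m.take i).sum) + ((m.drop i).sum - (m.drop i).length * v) := by
        rw [e1, e2, pv_sum_map_sub_left, pv_sum_map_sub_right]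
    _ = v * (2 * (i : Int) - (m.length : Int)) + m.sum - 2 * (m.take i).sum := by
        have hsum : (m.take i).sum + (m.drop i).sum = m.sum := by
          conv_rhs => rw [hsplit]
          rw [List.sum_append]
        have hlen_drop : ((m.drop i).length : Int) = (m.length : Int) - (i : Int) := by
          simp [List.length_drop]; omega
        rw [hlen_take, hlen_drop, ← hsum]
        push_cast
        ring

lemma pv_B_char (input : List Int) :
    align_carbs_alt input
    = (PySem.List.min?
        ((PySem.List.sorted ((input.map (fun v => |v|))) (fun v => v) false).map
          (pvCost (PySem.List.sorted ((input.map (fun v => |v|))) (fun v => v) false))) (fun v => v)).getD 0 := by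
  unfold align_carbs_alt
  simp only [List.map_id']
  rw [pv_B_fold _ _ _ (le_refl _)]
  congr 2
  apply List.ext_getElem
  · simp [PySem.List.length_pyRange_one]
  · intro i h1 h2
    set m := PySem.List.sorted (input.map (fun v => |v|)) (fun v => v) false with hm
    have hi : i < m.length := by simpa [PySem.List.length_pyRange_one] using h1
    have hidx : (PySem.List.pyRange 0 (m.length : Int) 1)[i]'(by simpa using h1) = (i : Int) := by
      rw [PySem.List.getElem_pyRange_one]; ring
    rw [List.getElem_map, List.getElem_map, hidx]
    have hget : PySem.List.pyGetD m (i : Int) 0 = m[i] := by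
      rw [PySem.List.pyGetD_natCast]
      exact List.getD_eq_getElem _ _ hi
    have hsorted : m.Sorted (· ≤ ·) := by
      have := PySem.List.sorted_pairwise (input.map (fun v => |v|)) (fun v => v)
      exact this
    rw [hget, Int.toNat_natCast, ← pv_sorted_cost m hsorted i hi]

-- ---- min over a permutation ----
lemma pv_min_perm (l l' : List Int) (hp : l.Perm l') :
    PySem.List.min? l (fun v => v) = PySem.List.min? l' (fun v => v) := by
  cases h1 : PySem.List.min? l (fun v => v) with
  | none =>
    rw [PySem.List.min?_eq_none_iff] at h1
    subst h1
    rw [(PySem.List.min?_eq_none_iff _ _).mpr (List.Perm.eq_nil hp.symm)]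
  | some a =>
    cases h2 : PySem.List.min? l' (fun v => v) with
    | none =>
      rw [PySem.List.min?_eq_none_iff] at h2
      subst h2
      rw [List.Perm.eq_nil hp] at h1
      simp [PySem.List.min?] at h1
    | some b =>
      have ha := PySem.List.min?_mem h1
      have hb := PySem.List.min?_mem h2
      have h1' := PySem.List.min?_isMin h1
      have h2' := PySem.List.min?_isMin h2
      have := le_antisymm (h1' b (hp.symm.subset hb)) (h2' a (hp.subset ha))
      simp [this]

-- ===== VERDICT (by name: the statement is the Claim_ definition above) =====
theorem align_carbs_spec : Claim_equal_align_carbs := by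
  intro input _ hpre
  unfold Spec_align_carbs
  unfold Pre_align_carbs at hpre
  rw [pv_A_char input hpre, pv_B_char input]
  have hp : (PySem.List.sorted (input.map (fun v => |v|)) (fun v => v) false).Perm
      (input.map (fun v => |v|)) := PySem.List.sorted_perm _ _ _
  have hfun : pvCost (PySem.List.sorted (input.map (fun v => |v|)) (fun v => v) false)
      = pvCost (input.map (fun v => |v|)) := by
    funext v
    exact (hp.map (fun w => |v - w|)).sum_eq
  rw [hfun, pv_min_perm _ _ ((hp.map (pvCost (input.map (fun v => |v|)))).symm)]
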